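-- pv_equiv track=rewrite | github.com/louai-ritual/priveri | utils/model_utils.py | _compute_position_ids
-- ===== SOURCE A (Python) =====
-- def _compute_position_ids(is_sentinel):
--     """
--     Compute position_ids under the sentinel scheme:
--       - Base and generated non-sentinel tokens get 0..N-1 in order.
--       - Sentinel tokens always get position_id == 0.
--     """
--     pos_ids = []
--     base_pos = 0
--     for flag in is_sentinel:
--         if flag:
--             pos_ids.append(0)
--         else:
--             pos_ids.append(base_pos)
--             base_pos += 1
--     return pos_ids
-- ===== SOURCE B (Python) =====
-- from itertools import accumulate
--
-- def _compute_position_ids(is_sentinel):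
--     flags = list(is_sentinel)
--     prefix = list(accumulate((0 if f else 1 for f in flags), initial=0))
--     return [0 if f else p for f, p in zip(flags, prefix)]
-- ===== Notes on version B (the rewrite author's own statement) =====
-- stated objective: alternative
-- what changed: Replaces the single loop with a mutable running counter by an exclusive prefix-count table of non-sentinel tokens (itertools.accumulate) followed by a separate selecting pass zipping flags with the table.
import Mathlib
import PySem

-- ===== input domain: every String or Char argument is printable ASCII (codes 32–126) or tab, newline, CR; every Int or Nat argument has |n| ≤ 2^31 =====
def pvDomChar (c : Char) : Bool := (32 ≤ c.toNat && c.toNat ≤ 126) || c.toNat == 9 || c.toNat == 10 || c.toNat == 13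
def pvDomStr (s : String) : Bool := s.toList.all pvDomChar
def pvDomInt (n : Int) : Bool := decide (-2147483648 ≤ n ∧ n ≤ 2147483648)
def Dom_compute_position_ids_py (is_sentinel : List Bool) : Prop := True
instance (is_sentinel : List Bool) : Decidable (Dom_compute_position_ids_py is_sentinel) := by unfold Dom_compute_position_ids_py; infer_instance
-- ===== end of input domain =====

-- B replaces A's single loop with a running counter by an exclusive prefix-count
-- table built first and a separate selecting pass over flags zipped with it.

-- ===== PORT A =====
-- one loop, state (pos_ids, base_pos)
def compute_position_ids_py (is_sentinel : List Bool) : List Int :=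
  (is_sentinel.foldl
    (fun (st : List Int × Int) flag =>
      if flag then (st.1 ++ [0], st.2) else (st.1 ++ [st.2], st.2 + 1))
    ([], 0)).1

-- ===== PORT B =====
-- prefix table (accumulate with initial=0 ≙ scanl), then a selecting pass
def compute_position_ids_py_alt (is_sentinel : List Bool) : List Int :=
  let prefixTbl : List Int :=
    is_sentinel.scanl (fun acc flag => acc + (if flag then 0 else 1)) 0
  (is_sentinel.zip prefixTbl).map (fun fp => if fp.1 then 0 else fp.2)

-- ===== PRECONDITION & SPEC =====
def Spec_compute_position_ids_py (is_sentinel : List Bool) (out : List Int) : Prop := out = compute_position_ids_py_alt is_sentinel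
instance (is_sentinel : List Bool) (out : List Int) : Decidable (Spec_compute_position_ids_py is_sentinel out) := by unfold Spec_compute_position_ids_py; infer_instance

-- ===== CLAIM (what is proved, stated in full; the proofs are below) =====
def Claim_equal_compute_position_ids_py : Prop := ∀ (is_sentinel : List Bool), Dom_compute_position_ids_py is_sentinel → Spec_compute_position_ids_py is_sentinel (compute_position_ids_py is_sentinel)

-- ===== LEMMAS AND PROOFS =====

-- loop invariant: A's fold from state (acc, base) appends exactly B's zipped
-- selection of the remaining flags against the prefix table started at base
theorem pv_fold_eq (flags : List Bool) (acc : List Int) (base : Int) :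
    (flags.foldl
      (fun (st : List Int × Int) flag =>
        if flag then (st.1 ++ [0], st.2) else (st.1 ++ [st.2], st.2 + 1))
      (acc, base)).1
    = acc ++ (flags.zip (flags.scanl (fun a flag => a + (if flag then 0 else 1)) base)).map
        (fun fp => if fp.1 then 0 else fp.2) := by
  induction flags generalizing acc base with
  | nil => simp
  | cons f rest ih =>
    cases f <;> simp [List.foldl, List.scanl, ih]

-- ===== VERDICT (by name: the statement is the Claim_ definition above) =====
theorem compute_position_ids_py_spec : Claim_equal_compute_position_ids_py := by
  intro l _
  unfold Spec_compute_position_ids_py compute_position_ids_py compute_position_ids_py_alt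
  simpa using pv_fold_eq l [] 0
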